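-- pv_equiv track=rewrite | github.com/Godkimchiy/Algorithm | BAEKJOON/no.20437_문자열 게임 2_gold V.py | string_game
-- ===== SOURCE A (Python) =====
-- from collections import defaultdict
--
-- def string_game(string, K):
--     alphabets = defaultdict(list)
--     for i,alphabet in enumerate(string):
--         if string.count(alphabet)>=K:
--             alphabets[alphabet].append(i)
--
--     if not alphabets:
--         return -1,
--
--     len_min = 10001
--     len_max = 0
--     for indices in alphabets.values():
--         for i in range(len(indices)-(K-1)):
--             string_len = indices[i+(K-1)] - indices[i] + 1
--             len_min = min(len_min, string_len)
--             len_max = max(len_max, string_len)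
--
--     return len_min, len_max
-- ===== SOURCE B (Python) =====
-- from collections import deque
--
-- def string_game(string, K):
--     # One pass with a bounded deque of the K most recent positions per character.
--     recent = {}
--     len_min = 10001
--     len_max = 0
--     found = False
--     for i, c in enumerate(string):
--         dq = recent.get(c)
--         if dq is None:
--             dq = deque()
--             recent[c] = dq
--         dq.append(i)
--         if len(dq) > K:
--             dq.popleft()
--         if len(dq) == K:
--             found = True
--             length = dq[-1] - dq[0] + 1
--             len_min = min(len_min, length)
--             len_max = max(len_max, length)
--     if not found:
--         return -1,
--     return len_min, len_max
-- ===== Notes on version B (the rewrite author's own statement) =====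
-- stated objective: faster
-- what changed: A builds per-character occurrence-index lists (guarded by a repeated string.count scan per position) and then scans each list by index pairs (i, i+K-1); B makes a single online pass keeping per character a deque of its at most K most recent positions and updates the running min/max whenever a deque holds exactly K positions.
import Mathlib
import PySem

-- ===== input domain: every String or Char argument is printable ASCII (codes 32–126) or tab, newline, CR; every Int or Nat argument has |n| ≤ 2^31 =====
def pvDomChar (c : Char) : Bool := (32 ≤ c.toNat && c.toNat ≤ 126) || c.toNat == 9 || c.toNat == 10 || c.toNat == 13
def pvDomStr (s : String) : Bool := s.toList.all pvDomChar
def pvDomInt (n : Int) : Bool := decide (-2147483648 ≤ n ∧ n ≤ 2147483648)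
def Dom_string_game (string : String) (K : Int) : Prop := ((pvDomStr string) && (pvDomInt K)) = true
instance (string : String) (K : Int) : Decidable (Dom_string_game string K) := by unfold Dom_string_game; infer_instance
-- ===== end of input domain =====

-- B replaces A's build-all-occurrence-lists-then-index pass (with its repeated string.count scans)
-- by a single online pass keeping, per character, a deque of its at most K most recent positions; faster by a
-- different mechanism, same return value on Pre_.

-- ===== PORT A =====
def string_game (string : String) (K : Int) : List Int :=
  let s := string.toList
  let alphabets :=
    (PySem.List.enumerate s).foldl
      (fun (d : PySem.Dict Char (List Int)) p =>
        if ((PySem.Str.count string (String.ofList [p.2]) : Int) ≥ K) then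
          d.modify p.2 [] (fun v => v ++ [p.1])
        else d)
      PySem.Dict.empty
  if alphabets.size = 0 then [-1]
  else
    let mm :=
      alphabets.values.foldl
        (fun (mm : Int × Int) indices =>
          (PySem.List.pyRange 0 ((indices.length : Int) - (K - 1))).foldl
            (fun (mm : Int × Int) i =>
              let string_len :=
                PySem.List.pyGetD indices (i + (K - 1)) 0 - PySem.List.pyGetD indices i 0 + 1
              (min mm.1 string_len, max mm.2 string_len))
            mm)
        (10001, 0)
    [mm.1, mm.2]

-- ===== PORT B =====
-- loop body of B's single pass (a named helper for the fold)
def stepAlt (K : Int) (st : PySem.Dict Char (List Int) × Int × Int × Bool)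
    (p : Int × Char) : PySem.Dict Char (List Int) × Int × Int × Bool :=
  let dq0 := st.1.getD p.2 []
  let dq1 := dq0 ++ [p.1]
  let dq := if (dq1.length : Int) > K then dq1.tail else dq1
  let recent := st.1.insert p.2 dq
  if (dq.length : Int) = K then
    let length := PySem.List.pyGetD dq (-1) 0 - PySem.List.pyGetD dq 0 0 + 1
    (recent, min st.2.1 length, max st.2.2.1 length, true)
  else (recent, st.2.1, st.2.2.1, st.2.2.2)

def string_game_alt (string : String) (K : Int) : List Int :=
  let st := (PySem.List.enumerate string.toList).foldl (stepAlt K)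
      (PySem.Dict.empty, 10001, 0, false)
  if st.2.2.2 = false then [-1] else [st.2.1, st.2.2.1]

-- ===== PRECONDITION & SPEC =====
-- Pre_ excludes only inputs on which A raises IndexError: K ≤ 0 with a nonempty string.
def Pre_string_game (string : String) (K : Int) : Prop := 1 ≤ K ∨ string.toList = []
instance (string : String) (K : Int) : Decidable (Pre_string_game string K) := by
  unfold Pre_string_game; infer_instance
def pvWitness_string_game : String × Int := ("abcaba", 2)

def Spec_string_game (string : String) (K : Int) (out : List Int) : Prop := out = string_game_alt string K
instance (string : String) (K : Int) (out : List Int) : Decidable (Spec_string_game string K out) := by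
  unfold Spec_string_game; infer_instance

-- ===== CLAIM (what is proved, stated in full; the proofs are below) =====
def Claim_equal_string_game : Prop := ∀ (string : String) (K : Int), Dom_string_game string K → Pre_string_game string K → Spec_string_game string K (string_game string K)
-- ===== LEMMAS AND PROOFS =====

-- proof-side vocabulary
def gmm (mm : Int × Int) (x : Int) : Int × Int := (min mm.1 x, max mm.2 x)

def posOf (l : List (Int × Char)) (c : Char) : List Int :=
  (l.filter (fun p => p.2 == c)).map (fun p => p.1)

def wins (K : Int) (occ : List Int) : List Int :=
  (PySem.List.pyRange 0 ((occ.length : Int) - (K - 1))).map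
    (fun i => PySem.List.pyGetD occ (i + (K - 1)) 0 - PySem.List.pyGetD occ i 0 + 1)

def flatWins (K : Int) (l : List (Int × Char)) : List Int :=
  (PySem.Set.ofList (l.map (fun p => p.2))).flatMap (fun c => wins K (posOf l c))

def tailOf (K : Int) (occ : List Int) : List Int := occ.drop (occ.length - K.toNat)

def dictOf (K : Int) (l : List (Int × Char)) : PySem.Dict Char (List Int) :=
  PySem.Dict.mk ((PySem.Set.ofList (l.map (fun p => p.2))).map (fun c => (c, tailOf K (posOf l c))))

def emitList (K : Int) (l : List (Int × Char)) (p : Int × Char) : List Int :=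
  if K ≤ ((posOf l p.2).length : Int) + 1 then
    [p.1 - PySem.List.pyGetD (posOf l p.2 ++ [p.1]) (((posOf l p.2).length : Int) + 1 - K) 0 + 1]
  else []

lemma gmm_comm (z : Int × Int) (x y : Int) : gmm (gmm z x) y = gmm (gmm z y) x := by
  simp only [gmm, Prod.mk.injEq]
  exact ⟨min_right_comm z.1 x y, max_right_comm z.2 x y⟩

lemma count_go_singleton (c : Char) (l : List Char) (fuel acc : Nat) (h : l.length ≤ fuel) :
    PySem.Chars.count.go [c] fuel l acc = acc + l.count c := by
  induction l generalizing fuel acc with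
  | nil => cases fuel <;> simp [PySem.Chars.count.go]
  | cons x t ih =>
    cases fuel with
    | zero => simp at h
    | succ f =>
      have ht : t.length ≤ f := by simpa using h
      by_cases hx : c = x
      · subst hx
        simp [PySem.Chars.count.go, List.isPrefixOf, ih f (acc + 1) ht]
        omega
      · simp [PySem.Chars.count.go, List.isPrefixOf, hx, ih f acc ht]
        simp [Ne.symm hx]

lemma str_count_singleton (s : String) (c : Char) :
    PySem.Str.count s (String.ofList [c]) = s.toList.count c := by
  show PySem.Chars.count s.toList (String.ofList [c]).toList = _
  have h1 : (String.ofList [c]).toList = [c] := by simp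
  rw [h1]
  unfold PySem.Chars.count
  simpa using count_go_singleton c s.toList s.toList.length 0 le_rfl

lemma wins_eq_nil_of_lt {K : Int} {occ : List Int} (h : (occ.length : Int) < K) :
    wins K occ = [] := by
  unfold wins
  rw [PySem.List.pyRange_one_eq_nil (by omega)]
  rfl

lemma pyGetD_append_lt (occ : List Int) (x : Int) {j : Int} (h0 : 0 ≤ j)
    (h1 : j < (occ.length : Int)) (d : Int) :
    PySem.List.pyGetD (occ ++ [x]) j d = PySem.List.pyGetD occ j d := by
  have hl : j < (((occ ++ [x]).length : Nat) : Int) := by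
    simp only [List.length_append, List.length_cons, List.length_nil]
    omega
  rw [PySem.List.pyGetD_eq_getElem (occ ++ [x]) d h0 hl,
      PySem.List.pyGetD_eq_getElem occ d h0 h1]
  exact List.getElem_append_left (by omega)

lemma wins_snoc {K : Int} (hK : 1 ≤ K) (occ : List Int) (x : Int) :
    wins K (occ ++ [x]) = wins K occ ++
      (if K ≤ (occ.length : Int) + 1 then
        [x - PySem.List.pyGetD (occ ++ [x]) ((occ.length : Int) + 1 - K) 0 + 1]
      else []) := by
  by_cases hc : K ≤ (occ.length : Int) + 1
  · rw [if_pos hc]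
    unfold wins
    have hlen : (((occ ++ [x]).length : Int) - (K - 1)) = ((occ.length : Int) - (K - 1)) + 1 := by
      simp only [List.length_append, List.length_cons, List.length_nil]
      push_cast
      ring
    rw [hlen, PySem.List.pyRange_one_succ_right (by omega), List.map_append]
    congr 1
    · apply List.map_congr_left
      intro i hi
      rw [PySem.List.mem_pyRange_one] at hi
      rw [pyGetD_append_lt occ x (by omega) (by omega) 0,
          pyGetD_append_lt occ x (by omega) (by omega) 0]
    · simp only [List.map_cons, List.map_nil]
      have e1 : ((occ.length : Int) - (K - 1)) + (K - 1) = ((occ.length : Nat) : Int) := by ring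
      rw [e1]
      have e2 : PySem.List.pyGetD (occ ++ [x]) (((occ.length : Nat)) : Int) 0 = x := by
        rw [PySem.List.pyGetD_natCast, List.getD_append_right occ [x] 0 occ.length le_rfl]
        simp
      have e3 : ((occ.length : Int) - (K - 1)) = ((occ.length : Int) + 1 - K) := by ring
      rw [e2, e3]
  · rw [if_neg hc]
    rw [wins_eq_nil_of_lt
          (by simp only [List.length_append, List.length_cons, List.length_nil]; push_cast; omega),
        wins_eq_nil_of_lt (by omega)]
    simp

lemma posOf_append (l l2 : List (Int × Char)) (c : Char) :
    posOf (l ++ l2) c = posOf l c ++ posOf l2 c := by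
  simp [posOf, List.filter_append]

lemma posOf_singleton (p : Int × Char) (c : Char) :
    posOf [p] c = if p.2 = c then [p.1] else [] := by
  by_cases h : p.2 = c <;> simp [posOf, h]

lemma posOf_eq_nil_of_not_mem {l : List (Int × Char)} {c : Char}
    (h : c ∉ l.map (fun p => p.2)) : posOf l c = [] := by
  unfold posOf
  have : l.filter (fun p => p.2 == c) = [] := by
    rw [List.filter_eq_nil_iff]
    intro a ha hc
    exact h (List.mem_map.mpr ⟨a, ha, by simpa using hc⟩)
  rw [this, List.map_nil]

lemma ofList_snoc {α : Type} [BEq α] (xs : List α) (x : α) :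
    PySem.Set.ofList (xs ++ [x]) = (PySem.Set.ofList xs).add x := by
  simp [PySem.Set.ofList_eq_foldl, List.foldl_append]

lemma flatMap_congr_mem {S : List Char} {g g' : Char → List Int}
    (h : ∀ c ∈ S, g' c = g c) : S.flatMap g' = S.flatMap g := by
  simp only [List.flatMap]
  rw [List.map_congr_left h]

lemma flatMap_update_perm {S : List Char} (hnd : S.Nodup) {c0 : Char} (hc : c0 ∈ S)
    (g g' : Char → List Int) (E : List Int) (h : ∀ c, c ≠ c0 → g' c = g c)
    (hg : g' c0 = g c0 ++ E) : (S.flatMap g').Perm (S.flatMap g ++ E) := by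
  induction S with
  | nil => cases hc
  | cons a S ih =>
    rcases List.nodup_cons.mp hnd with ⟨ha, hS⟩
    simp only [List.flatMap_cons]
    rcases List.mem_cons.mp hc with rfl | hc'
    · have hrest : S.flatMap g' = S.flatMap g :=
        flatMap_congr_mem (fun c hcS => h c (fun e => ha (e ▸ hcS)))
      rw [hg, hrest]
      simp only [List.append_assoc]
      exact List.Perm.append_left _ List.perm_append_comm
    · rw [h a (fun e => ha (e ▸ hc'))]
      simp only [List.append_assoc]
      exact List.Perm.append_left _ (ih hS hc')

lemma flatWins_snoc {K : Int} (hK : 1 ≤ K) (l : List (Int × Char)) (p : Int × Char) :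
    (flatWins K (l ++ [p])).Perm (flatWins K l ++ emitList K l p) := by
  unfold flatWins emitList
  rw [List.map_append, List.map_cons, List.map_nil, ofList_snoc]
  by_cases hm : p.2 ∈ l.map (fun p => p.2)
  · have hmem : p.2 ∈ PySem.Set.ofList (l.map fun p => p.2) :=
      (PySem.Set.mem_ofList _ _).mpr hm
    have hadd : (PySem.Set.ofList (l.map fun p => p.2)).add p.2 =
        PySem.Set.ofList (l.map fun p => p.2) := by
      simp [PySem.Set.add, PySem.Set.contains, List.contains_eq_mem, hmem]
    rw [hadd]
    refine flatMap_update_perm (PySem.Set.nodup_ofList _) hmem _ _ _ ?_ ?_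
    · intro c hcne
      rw [posOf_append, posOf_singleton, if_neg (fun e => hcne e.symm)]
      simp
    · rw [posOf_append, posOf_singleton, if_pos rfl]
      exact wins_snoc hK _ _
  · have hnm : p.2 ∉ PySem.Set.ofList (l.map fun p => p.2) :=
      fun hx => hm ((PySem.Set.mem_ofList _ _).mp hx)
    have hadd : (PySem.Set.ofList (l.map fun p => p.2)).add p.2 =
        PySem.Set.ofList (l.map fun p => p.2) ++ [p.2] := by
      simp [PySem.Set.add, PySem.Set.contains, List.contains_eq_mem, hm]
    rw [hadd, List.flatMap_append]
    have h1 : (PySem.Set.ofList (l.map fun p => p.2)).flatMap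
          (fun c => wins K (posOf (l ++ [p]) c)) =
        (PySem.Set.ofList (l.map fun p => p.2)).flatMap (fun c => wins K (posOf l c)) := by
      apply flatMap_congr_mem
      intro c hcS
      rw [posOf_append, posOf_singleton, if_neg (fun e => hnm (by rw [e]; exact hcS))]
      simp
    rw [h1]
    have h2 : posOf (l ++ [p]) p.2 = posOf l p.2 ++ [p.1] := by
      rw [posOf_append, posOf_singleton, if_pos rfl]
    have h3 : posOf l p.2 = [] := posOf_eq_nil_of_not_mem hm
    simp only [List.flatMap_cons, List.flatMap_nil, List.append_nil]
    rw [h2, h3, wins_snoc hK [] p.1, wins_eq_nil_of_lt (by simpa using hK)]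
    simp

lemma keys_dictOf (K : Int) (l : List (Int × Char)) :
    (dictOf K l).keys = PySem.Set.ofList (l.map (fun p => p.2)) := by
  simp [dictOf, PySem.Dict.keys, List.map_map, Function.comp_def]

lemma getD_dictOf (K : Int) (l : List (Int × Char)) (c : Char) :
    (dictOf K l).getD c [] = tailOf K (posOf l c) := by
  by_cases hm : c ∈ l.map (fun p => p.2)
  · refine PySem.Dict.getD_of_mem_items _ ?_ ?_ []
    · exact List.mem_map.mpr ⟨c, (PySem.Set.mem_ofList _ _).mpr hm, rfl⟩
    · rw [keys_dictOf]; exact PySem.Set.nodup_ofList _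
  · rw [PySem.Dict.getD_of_not_contains _ _ ?_, posOf_eq_nil_of_not_mem hm]
    · simp [tailOf]
    · rw [Bool.eq_false_iff]
      intro hcon
      exact hm ((PySem.Set.mem_ofList _ _).mp (keys_dictOf K l ▸
        (PySem.Dict.contains_iff_mem_keys _ _).mp hcon))

lemma insert_dictOf {K : Int} (l : List (Int × Char)) (p : Int × Char) :
    (dictOf K l).insert p.2 (tailOf K (posOf l p.2 ++ [p.1])) = dictOf K (l ++ [p]) := by
  apply PySem.Dict.ext
  rw [PySem.Dict.items_insert]
  by_cases hm : p.2 ∈ l.map (fun q => q.2)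
  · have hcont : (dictOf K l).contains p.2 = true := by
      rw [PySem.Dict.contains_iff_mem_keys, keys_dictOf]
      exact (PySem.Set.mem_ofList _ _).mpr hm
    rw [if_pos hcont]
    have hS' : PySem.Set.ofList ((l ++ [p]).map (fun q => q.2)) =
        PySem.Set.ofList (l.map fun q => q.2) := by
      rw [List.map_append, List.map_cons, List.map_nil, ofList_snoc]
      simp [PySem.Set.add, PySem.Set.contains, List.contains_eq_mem,
        (PySem.Set.mem_ofList _ _).mpr hm]
    show (List.map _ _).map _ = (PySem.Set.ofList ((l ++ [p]).map (fun q => q.2))).map _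
    rw [hS', List.map_map]
    apply List.map_congr_left
    intro c hcS
    by_cases hcp : c = p.2
    · subst hcp
      simp only [Function.comp_apply, beq_self_eq_true, if_pos]
      rw [posOf_append, posOf_singleton, if_pos rfl]
    · simp only [Function.comp_apply]
      rw [if_neg (by simpa using hcp)]
      rw [posOf_append, posOf_singleton, if_neg (fun e => hcp e.symm)]
      simp
  · have hcont : (dictOf K l).contains p.2 = false := by
      rw [Bool.eq_false_iff]
      intro hcon
      exact hm ((PySem.Set.mem_ofList _ _).mp (keys_dictOf K l ▸
        (PySem.Dict.contains_iff_mem_keys _ _).mp hcon))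
    rw [if_neg (by simp [hcont])]
    show (List.map _ _) ++ _ = (PySem.Set.ofList ((l ++ [p]).map (fun q => q.2))).map _
    have hS' : PySem.Set.ofList ((l ++ [p]).map (fun q => q.2)) =
        PySem.Set.ofList (l.map fun q => q.2) ++ [p.2] := by
      rw [List.map_append, List.map_cons, List.map_nil, ofList_snoc]
      simp [PySem.Set.add, PySem.Set.contains, List.contains_eq_mem, hm]
    rw [hS', List.map_append, List.map_cons, List.map_nil]
    congr 1
    · apply List.map_congr_left
      intro c hcS
      have hcp : c ≠ p.2 := fun e => hm ((PySem.Set.mem_ofList _ _).mp (e ▸ hcS))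
      rw [posOf_append, posOf_singleton, if_neg (fun e => hcp e.symm)]
      simp
    · rw [posOf_append, posOf_singleton, if_pos rfl]

lemma binv {K : Int} (hK : 1 ≤ K) (l : List (Int × Char)) :
    l.foldl (stepAlt K) (PySem.Dict.empty, 10001, 0, false) =
      (dictOf K l, (List.foldl gmm (10001, 0) (flatWins K l)).1,
       (List.foldl gmm (10001, 0) (flatWins K l)).2, !(flatWins K l).isEmpty) := by
  induction l using List.reverseRecOn with
  | nil => rfl
  | append_singleton l p ih =>
    rw [List.foldl_append, List.foldl_cons, List.foldl_nil, ih]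
    have hperm := flatWins_snoc hK l p
    have hfold : List.foldl gmm (10001, 0) (flatWins K (l ++ [p])) =
        List.foldl gmm (List.foldl gmm (10001, 0) (flatWins K l)) (emitList K l p) := by
      rw [List.Perm.foldl_eq' hperm (fun x _ y _ z => gmm_comm z x y) _, List.foldl_append]
    have hemp : (flatWins K (l ++ [p])).isEmpty = (flatWins K l ++ emitList K l p).isEmpty := by
      rw [Bool.eq_iff_iff, List.isEmpty_iff, List.isEmpty_iff]
      constructor
      · intro h; exact (List.Perm.nil_eq (h ▸ hperm)).symm
      · intro h; exact (List.Perm.nil_eq (h ▸ hperm.symm)).symm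
    rw [hfold, hemp]
    simp only [stepAlt, getD_dictOf]
    by_cases hnk : K.toNat ≤ (posOf l p.2).length
    · -- the deque is full: pop, and a window is emitted
      rw [if_pos (show ((tailOf K (posOf l p.2) ++ [p.1]).length : Int) > K by
        simp only [List.length_append, List.length_cons, List.length_nil, tailOf,
          List.length_drop]; omega)]
      have hdq : (tailOf K (posOf l p.2) ++ [p.1]).tail = tailOf K (posOf l p.2 ++ [p.1]) := by
        unfold tailOf
        rw [← List.drop_append_of_le_length (by omega), List.tail_drop]
        congr 1
        simp only [List.length_append, List.length_cons, List.length_nil]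
        omega
      rw [hdq]
      have hdlen : (tailOf K (posOf l p.2 ++ [p.1])).length = K.toNat := by
        simp only [tailOf, List.length_drop, List.length_append, List.length_cons,
          List.length_nil]
        omega
      rw [if_pos (show ((tailOf K (posOf l p.2 ++ [p.1])).length : Int) = K by
        rw [hdlen]; omega)]
      have hdrop : tailOf K (posOf l p.2 ++ [p.1]) =
          (posOf l p.2).drop ((posOf l p.2).length + 1 - K.toNat) ++ [p.1] := by
        unfold tailOf
        rw [List.drop_append_of_le_length (by simp only [List.length_append,
          List.length_cons, List.length_nil]; omega)]
        congr 2
        simp only [List.length_append, List.length_cons, List.length_nil]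
      have he1 : PySem.List.pyGetD (tailOf K (posOf l p.2 ++ [p.1])) (-1) 0 = p.1 := by
        rw [hdrop]; exact PySem.List.pyGetD_neg_one_append_singleton _ _ _
      have he2 : PySem.List.pyGetD (tailOf K (posOf l p.2 ++ [p.1])) 0 0 =
          PySem.List.pyGetD (posOf l p.2 ++ [p.1])
            (((posOf l p.2).length : Int) + 1 - K) 0 := by
        have hidx : (((posOf l p.2).length : Int) + 1 - K) =
            ((((posOf l p.2).length + 1 - K.toNat : Nat)) : Int) := by omega
        rw [hidx, PySem.List.pyGetD_natCast, PySem.List.pyGetD_zero]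
        unfold tailOf
        rw [List.getD_eq_getElem?_getD, List.getD_eq_getElem?_getD, List.getElem?_drop]
        congr 2
        simp only [List.length_append, List.length_cons, List.length_nil]
        omega
      have hEm : emitList K l p = [p.1 - PySem.List.pyGetD (posOf l p.2 ++ [p.1])
          (((posOf l p.2).length : Int) + 1 - K) 0 + 1] := by
        unfold emitList
        rw [if_pos (by omega)]
      rw [hEm, he1, he2]
      simp only [List.foldl_cons, List.foldl_nil, insert_dictOf, gmm]
      simp
    · -- fewer than K occurrences so far: no pop
      rw [if_neg (show ¬ ((tailOf K (posOf l p.2) ++ [p.1]).length : Int) > K by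
        simp only [List.length_append, List.length_cons, List.length_nil, tailOf,
          List.length_drop]; omega)]
      have hdq : tailOf K (posOf l p.2) ++ [p.1] = tailOf K (posOf l p.2 ++ [p.1]) := by
        unfold tailOf
        have h1 : (posOf l p.2).length - K.toNat = 0 := by omega
        have h2 : (posOf l p.2 ++ [p.1]).length - K.toNat = 0 := by
          simp only [List.length_append, List.length_cons, List.length_nil]; omega
        rw [h1, h2, List.drop_zero, List.drop_zero]
      rw [hdq]
      have hdlen : (tailOf K (posOf l p.2 ++ [p.1])).length = (posOf l p.2).length + 1 := by
        simp only [tailOf, List.length_drop, List.length_append, List.length_cons,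
          List.length_nil]
        omega
      by_cases hfull : (posOf l p.2).length + 1 = K.toNat
      · rw [if_pos (show ((tailOf K (posOf l p.2 ++ [p.1])).length : Int) = K by
          rw [hdlen]; omega)]
        have hdrop : tailOf K (posOf l p.2 ++ [p.1]) =
            (posOf l p.2).drop ((posOf l p.2).length + 1 - K.toNat) ++ [p.1] := by
          unfold tailOf
          have h1 : (posOf l p.2 ++ [p.1]).length - K.toNat = 0 := by
            simp only [List.length_append, List.length_cons, List.length_nil]; omega
          have h2 : (posOf l p.2).length + 1 - K.toNat = 0 := by omega
          rw [h1, h2, List.drop_zero, List.drop_zero]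
        have he1 : PySem.List.pyGetD (tailOf K (posOf l p.2 ++ [p.1])) (-1) 0 = p.1 := by
          rw [hdrop]; exact PySem.List.pyGetD_neg_one_append_singleton _ _ _
        have he2 : PySem.List.pyGetD (tailOf K (posOf l p.2 ++ [p.1])) 0 0 =
            PySem.List.pyGetD (posOf l p.2 ++ [p.1])
              (((posOf l p.2).length : Int) + 1 - K) 0 := by
          have hidx : (((posOf l p.2).length : Int) + 1 - K) =
              ((((posOf l p.2).length + 1 - K.toNat : Nat)) : Int) := by omega
          rw [hidx, PySem.List.pyGetD_natCast, PySem.List.pyGetD_zero]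
          unfold tailOf
          rw [List.getD_eq_getElem?_getD, List.getD_eq_getElem?_getD, List.getElem?_drop]
          congr 2
          simp only [List.length_append, List.length_cons, List.length_nil]
          omega
        have hEm : emitList K l p = [p.1 - PySem.List.pyGetD (posOf l p.2 ++ [p.1])
            (((posOf l p.2).length : Int) + 1 - K) 0 + 1] := by
          unfold emitList
          rw [if_pos (by omega)]
        rw [hEm, he1, he2]
        simp only [List.foldl_cons, List.foldl_nil, insert_dictOf, gmm]
        simp
      · rw [if_neg (show ¬ ((tailOf K (posOf l p.2 ++ [p.1])).length : Int) = K by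
          rw [hdlen]; omega)]
        have hEm : emitList K l p = [] := by
          unfold emitList
          rw [if_neg (by omega)]
        rw [hEm]
        simp only [List.foldl_nil, insert_dictOf, List.append_nil]

lemma ofList_eq_nil_iff {α : Type} [BEq α] [LawfulBEq α] (xs : List α) :
    PySem.Set.ofList xs = [] ↔ xs = [] := by
  constructor
  · intro h
    cases xs with
    | nil => rfl
    | cons x t =>
      exact absurd ((PySem.Set.mem_ofList (x :: t) x).mpr (List.mem_cons_self))
        (by rw [h]; exact List.not_mem_nil)
  · intro h; rw [h]; rfl

lemma add_filter {α : Type} [BEq α] [LawfulBEq α] (q : α → Bool) (acc : PySem.Set α) (x : α) :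
    (PySem.Set.add acc x).filter q =
      if q x then PySem.Set.add (acc.filter q) x else acc.filter q := by
  by_cases hmx : x ∈ acc
  · have h1 : PySem.Set.add acc x = acc := by
      simp [PySem.Set.add, PySem.Set.contains, List.contains_eq_mem, hmx]
    rw [h1]
    by_cases hq : q x
    · rw [if_pos hq]
      have h2 : PySem.Set.add (acc.filter q) x = acc.filter q := by
        simp [PySem.Set.add, PySem.Set.contains, List.contains_eq_mem, List.mem_filter, hmx, hq]
      rw [h2]
    · rw [if_neg hq]
  · have h1 : PySem.Set.add acc x = acc ++ [x] := by
      simp [PySem.Set.add, PySem.Set.contains, List.contains_eq_mem, hmx]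
    rw [h1, List.filter_append]
    by_cases hq : q x
    · rw [if_pos hq]
      have h2 : PySem.Set.add (acc.filter q) x = acc.filter q ++ [x] := by
        have hx : x ∉ acc.filter q := fun hx => hmx (List.mem_filter.mp hx).1
        simp [PySem.Set.add, PySem.Set.contains, List.contains_eq_mem, hx]
      rw [h2]
      simp [hq]
    · rw [if_neg hq]
      simp [hq]

lemma ofList_filter {α : Type} [BEq α] [LawfulBEq α] (q : α → Bool) (xs : List α) :
    PySem.Set.ofList (xs.filter q) = (PySem.Set.ofList xs).filter q := by
  have key : ∀ (acc : PySem.Set α),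
      List.foldl PySem.Set.add (acc.filter q) (xs.filter q) =
        (List.foldl PySem.Set.add acc xs).filter q := by
    induction xs with
    | nil => intro acc; rfl
    | cons x t ih =>
      intro acc
      rw [List.filter_cons]
      by_cases hq : q x
      · rw [if_pos hq]
        simp only [List.foldl_cons]
        rw [← ih (PySem.Set.add acc x), add_filter, if_pos hq]
      · rw [if_neg hq]
        simp only [List.foldl_cons]
        rw [← ih (PySem.Set.add acc x), add_filter, if_neg hq]
  have h0 := key []
  rw [PySem.Set.ofList_eq_foldl, PySem.Set.ofList_eq_foldl]
  simpa using h0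

lemma flatMap_filter_of_nil {S : List Char} {q : Char → Bool} {g : Char → List Int}
    (h : ∀ c ∈ S, q c = false → g c = []) : (S.filter q).flatMap g = S.flatMap g := by
  induction S with
  | nil => rfl
  | cons a S ih =>
    rw [List.filter_cons]
    have ih' := ih (fun c hc hqc => h c (List.mem_cons_of_mem a hc) hqc)
    by_cases hq : q a
    · rw [if_pos hq, List.flatMap_cons, List.flatMap_cons, ih']
    · rw [if_neg hq, List.flatMap_cons, h a List.mem_cons_self (by simpa using hq), ih',
        List.nil_append]

lemma length_posOf_count (s : List Char) (c : Char) :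
    (posOf (PySem.List.enumerate s) c).length = s.count c := by
  simp only [posOf, List.length_map, ← List.countP_eq_length_filter]
  rw [List.count_eq_countP]
  conv_rhs => rw [show s = (PySem.List.enumerate s).map (fun p => p.2) from
    (PySem.List.map_snd_enumerate s _).symm]
  rw [List.countP_map]
  rfl

lemma charA {string : String} {K : Int} :
    string_game string K =
      (if ((PySem.List.enumerate string.toList).filter
            (fun p => decide (((string.toList.count p.2 : Int)) ≥ K))) = [] then [-1]
       else
        [(List.foldl gmm (10001, 0) (flatWins K
            ((PySem.List.enumerate string.toList).filter
              (fun p => decide (((string.toList.count p.2 : Int)) ≥ K))))).1,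
         (List.foldl gmm (10001, 0) (flatWins K
            ((PySem.List.enumerate string.toList).filter
              (fun p => decide (((string.toList.count p.2 : Int)) ≥ K))))).2]) := by
  unfold string_game
  simp only [str_count_singleton]
  rw [PySem.List.foldl_ite_eq_foldl_filter
      (p := fun p : Int × Char => ((string.toList.count p.2 : Int)) ≥ K)
      (f := fun (d : PySem.Dict Char (List Int)) p => d.modify p.2 [] (fun v => v ++ [p.1]))]
  set lq := (PySem.List.enumerate string.toList).filter
      (fun p => decide (((string.toList.count p.2 : Int)) ≥ K)) with hlq
  set d := List.foldl
      (fun (d : PySem.Dict Char (List Int)) p => d.modify p.2 [] (fun v => v ++ [p.1]))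
      PySem.Dict.empty lq with hd
  have hkeys : d.keys = PySem.Set.ofList (lq.map (fun p => p.2)) := by
    rw [hd, PySem.Dict.keys_foldl_modify_key lq (fun p => p.2) []
      (fun _ p => (fun v => v ++ [p.1])) PySem.Dict.empty, PySem.Dict.keys_empty,
      PySem.Set.ofList_eq_foldl]
    rfl
  have hnodup : d.keys.Nodup := by
    rw [hkeys]; exact PySem.Set.nodup_ofList _
  have hswap : d = List.foldl
      (fun (d : PySem.Dict Char (List Int)) q => d.modify q.1 [] (fun v => v ++ [q.2]))
      PySem.Dict.empty (lq.map (fun p => (p.2, p.1))) := by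
    rw [List.foldl_map, hd]
  have hgetD : ∀ c, d.getD c [] = posOf lq c := by
    intro c
    rw [hswap, PySem.Dict.getD_foldl_modify_append]
    simp only [PySem.Dict.getD_empty, List.nil_append, List.filter_map, List.map_map]
    rfl
  have hsize0 : d.size = 0 ↔ lq = [] := by
    have h1 : d.size = d.keys.length := by
      show d.items.length = (d.items.map (fun p => p.1)).length
      rw [List.length_map]
    rw [h1, hkeys, List.length_eq_zero_iff, ofList_eq_nil_iff, List.map_eq_nil_iff]
  by_cases hq : lq = []
  · rw [if_pos (hsize0.mpr hq), if_pos hq]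
  · rw [if_neg (fun h => hq (hsize0.mp h)), if_neg hq]
    have hvals : d.values =
        (PySem.Set.ofList (lq.map (fun p => p.2))).map (fun c => posOf lq c) := by
      rw [PySem.Dict.values_eq_map_keys d hnodup [], hkeys]
      exact List.map_congr_left (fun c _ => hgetD c)
    rw [hvals, List.foldl_map]
    unfold flatWins wins
    rw [List.foldl_flatMap]
    simp only [List.foldl_map]
    rfl

lemma flatWins_filter {string : String} {K : Int} :
    flatWins K ((PySem.List.enumerate string.toList).filter
        (fun p => decide (((string.toList.count p.2 : Int)) ≥ K))) =
      flatWins K (PySem.List.enumerate string.toList) := by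
  unfold flatWins
  have hchars : ((PySem.List.enumerate string.toList).filter
        (fun p => decide (((string.toList.count p.2 : Int)) ≥ K))).map (fun p => p.2) =
      ((PySem.List.enumerate string.toList).map (fun p => p.2)).filter
        (fun c => decide (((string.toList.count c : Int)) ≥ K)) := by
    rw [List.filter_map]
    rfl
  rw [hchars, ofList_filter]
  have hpos : ∀ c, decide (((string.toList.count c : Int)) ≥ K) = true →
      posOf ((PySem.List.enumerate string.toList).filter
        (fun p => decide (((string.toList.count p.2 : Int)) ≥ K))) c =
      posOf (PySem.List.enumerate string.toList) c := by
    intro c hc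
    unfold posOf
    rw [List.filter_filter]
    congr 1
    apply List.filter_congr
    intro p _
    by_cases hpc : p.2 = c
    · subst hpc
      simp [hc]
    · simp [hpc]
  have hcongr : ((PySem.Set.ofList ((PySem.List.enumerate string.toList).map
        (fun p => p.2))).filter (fun c => decide (((string.toList.count c : Int)) ≥ K))).flatMap
        (fun c => wins K (posOf ((PySem.List.enumerate string.toList).filter
          (fun p => decide (((string.toList.count p.2 : Int)) ≥ K))) c)) =
      ((PySem.Set.ofList ((PySem.List.enumerate string.toList).map
        (fun p => p.2))).filter (fun c => decide (((string.toList.count c : Int)) ≥ K))).flatMap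
        (fun c => wins K (posOf (PySem.List.enumerate string.toList) c)) := by
    apply flatMap_congr_mem
    intro c hc
    rw [hpos c (List.mem_filter.mp hc).2]
  rw [hcongr]
  apply flatMap_filter_of_nil
  intro c _ hqc
  apply wins_eq_nil_of_lt
  rw [length_posOf_count]
  simp only [decide_eq_false_iff_not, not_le] at hqc
  exact hqc

lemma filter_nil_iff_flatWins_nil {string : String} {K : Int} :
    ((PySem.List.enumerate string.toList).filter
        (fun p => decide (((string.toList.count p.2 : Int)) ≥ K))) = [] ↔
      flatWins K (PySem.List.enumerate string.toList) = [] := by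
  constructor
  · intro h
    rw [← flatWins_filter (string := string) (K := K), h]
    rfl
  · intro h
    by_contra hne
    obtain ⟨p, hp⟩ := List.exists_mem_of_ne_nil _ hne
    have hq : decide (((string.toList.count p.2 : Int)) ≥ K) = true := (List.mem_filter.mp hp).2
    have hmem' : p ∈ PySem.List.enumerate string.toList := (List.mem_filter.mp hp).1
    have hSmem : p.2 ∈ PySem.Set.ofList
        ((PySem.List.enumerate string.toList).map (fun p => p.2)) :=
      (PySem.Set.mem_ofList _ _).mpr (List.mem_map.mpr ⟨p, hmem', rfl⟩)
    have hwin : wins K (posOf (PySem.List.enumerate string.toList) p.2) = [] := by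
      have := List.flatMap_eq_nil_iff.mp (by unfold flatWins at h; exact h)
      exact this p.2 hSmem
    have hlen : (wins K (posOf (PySem.List.enumerate string.toList) p.2)).length =
        ((((posOf (PySem.List.enumerate string.toList) p.2).length : Int) - (K - 1))).toNat := by
      unfold wins
      rw [List.length_map, PySem.List.length_pyRange_one]
      congr 1
      ring
    rw [hwin] at hlen
    simp only [List.length_nil] at hlen
    rw [length_posOf_count] at hlen
    simp only [decide_eq_true_eq, ge_iff_le] at hq
    omega


-- ===== VERDICT (by name: the statement is the Claim_ definition above) =====
theorem string_game_spec : Claim_equal_string_game := by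
  intro string K _ hpre
  unfold Spec_string_game
  rcases hpre with hK | hs
  · rw [charA]
    simp only [string_game_alt]
    rw [binv hK]
    by_cases h : ((PySem.List.enumerate string.toList).filter
        (fun p => decide (((string.toList.count p.2 : Int)) ≥ K))) = []
    · rw [if_pos h]
      have hfw := (filter_nil_iff_flatWins_nil (K := K)).mp h
      simp [hfw]
    · rw [if_neg h]
      have hfw : flatWins K (PySem.List.enumerate string.toList) ≠ [] :=
        fun e => h ((filter_nil_iff_flatWins_nil (K := K)).mpr e)
      have hie : (flatWins K (PySem.List.enumerate string.toList)).isEmpty = false :=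
        Bool.eq_false_iff.mpr (fun e => hfw (List.isEmpty_iff.mp e))
      rw [flatWins_filter]
      simp [hie]
  · simp [string_game, string_game_alt, hs, PySem.List.enumerate_nil, PySem.Dict.size_empty]
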